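-- pv_equiv track=rewrite | github.com/HassenBasdouri/CorrecteurOrthographeFR | correcteur.py | LettreInPsotions
-- ===== SOURCE A (Python) =====
-- def LettreInPsotions(mot, lettre, lpos):
--     """renvoie True si la chaîne mot dont les caractères dont la position
--     apparaît dans la liste lpos sont seulement  le caractère lettre."""
--     var=True
--     for i in range(len(mot)):
--         if str(i) in lpos:
--             var=var and (lettre==mot[i])
--         else :
--             var = var and mot[i]!=lettre
--     return var
-- ===== SOURCE B (Python) =====
-- def LettreInPsotions(mot, lettre, lpos):
--     found = {i for i in range(len(mot)) if mot[i] == lettre}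
--     expected = {i for i in range(len(mot)) if str(i) in lpos}
--     return found == expected
-- ===== Notes on version B (the rewrite author's own statement) =====
-- stated objective: simpler
-- what changed: Replaces A's running boolean AND with a per-position if/else by building two index sets (positions where the letter occurs vs in-range positions named in lpos) and comparing them for set equality.
import Mathlib
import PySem

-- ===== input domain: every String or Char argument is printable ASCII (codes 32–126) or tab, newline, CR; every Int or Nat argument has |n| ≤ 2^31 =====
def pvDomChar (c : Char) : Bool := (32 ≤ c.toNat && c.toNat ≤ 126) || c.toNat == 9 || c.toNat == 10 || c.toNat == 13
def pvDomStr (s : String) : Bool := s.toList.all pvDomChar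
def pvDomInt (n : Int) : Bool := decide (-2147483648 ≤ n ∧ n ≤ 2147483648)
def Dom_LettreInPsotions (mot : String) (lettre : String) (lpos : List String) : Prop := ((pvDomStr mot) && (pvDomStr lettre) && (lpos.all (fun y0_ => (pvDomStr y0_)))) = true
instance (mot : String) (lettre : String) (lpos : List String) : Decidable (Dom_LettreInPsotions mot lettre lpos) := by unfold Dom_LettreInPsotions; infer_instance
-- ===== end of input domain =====

-- B replaces A's running boolean AND (one if/else per position) with two index sets compared for equality: simpler decomposition, same cost.

-- ===== PORT A =====
-- literal port: var = True; for i in range(len(mot)): if str(i) in lpos: var = var and (lettre == mot[i]) else: var = var and mot[i] != lettre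
-- (mot[i] is a one-character string; compared as lists of chars.  getD's default is never used: i < len(mot).)
def LettreInPsotions (mot : String) (lettre : String) (lpos : List String) : Bool :=
  (List.range mot.toList.length).foldl
    (fun var i =>
      if lpos.contains (PySem.Int.toStr (Int.ofNat i)) then
        var && (lettre.toList == [mot.toList.getD i ' '])
      else
        var && !([mot.toList.getD i ' '] == lettre.toList))
    true

-- ===== PORT B =====
-- found = {i in range(len(mot)) | mot[i] == lettre}; expected = {i in range(len(mot)) | str(i) in lpos}; return found == expected
def LettreInPsotions_alt (mot : String) (lettre : String) (lpos : List String) : Bool :=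
  let found := PySem.Set.ofList
    ((List.range mot.toList.length).filter (fun i => [mot.toList.getD i ' '] == lettre.toList))
  let expected := PySem.Set.ofList
    ((List.range mot.toList.length).filter (fun i => lpos.contains (PySem.Int.toStr (Int.ofNat i))))
  PySem.Set.equal found expected

-- ===== PRECONDITION & SPEC =====
def Spec_LettreInPsotions (mot : String) (lettre : String) (lpos : List String) (out : Bool) : Prop := out = LettreInPsotions_alt mot lettre lpos
instance (mot : String) (lettre : String) (lpos : List String) (out : Bool) : Decidable (Spec_LettreInPsotions mot lettre lpos out) := by unfold Spec_LettreInPsotions; infer_instance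

-- ===== CLAIM (what is proved, stated in full; the proofs are below) =====
def Claim_equal_LettreInPsotions : Prop := ∀ (mot : String) (lettre : String) (lpos : List String), Dom_LettreInPsotions mot lettre lpos → Spec_LettreInPsotions mot lettre lpos (LettreInPsotions mot lettre lpos)

-- ===== LEMMAS AND PROOFS =====

-- A's loop: a foldl threading 'var && (branch)' equals 'all' of the per-position condition.
theorem foldl_and (c : Nat → Bool) :
    ∀ (l : List Nat) (b : Bool),
      l.foldl (fun v i => v && c i) b = (b && l.all c) := by
  intro l
  induction l with
  | nil => intro b; simp
  | cons hd tl ih =>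
      intro b
      simp [List.foldl_cons, List.all_cons, ih, Bool.and_assoc]

theorem foldl_and_ite (g p q : Nat → Bool) (l : List Nat) (b : Bool) :
    l.foldl (fun var i => if g i then var && p i else var && q i) b
      = (b && l.all (fun i => if g i then p i else q i)) := by
  have hstep : (fun (var : Bool) (i : Nat) => if g i then var && p i else var && q i)
      = (fun (var : Bool) (i : Nat) => var && (if g i then p i else q i)) := by
    funext var i
    by_cases hg : g i = true
    · simp [hg]
    · simp only [Bool.not_eq_true] at hg
      simp [hg]
  rw [hstep, foldl_and]

-- set equality of the two filtered index sets equals the pointwise agreement A checks.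
theorem all_iff_filter_sets (n : Nat) (f g : Nat → Bool) :
    ((List.range n).all (fun i => if g i then f i else !f i))
      = PySem.Set.equal (PySem.Set.ofList ((List.range n).filter f))
          (PySem.Set.ofList ((List.range n).filter g)) := by
  rw [Bool.eq_iff_iff]
  simp only [List.all_eq_true, PySem.Set.equal_iff, PySem.Set.mem_ofList, List.mem_filter,
    List.mem_range]
  constructor
  · intro h x
    constructor
    · rintro ⟨hx, hf⟩
      refine ⟨hx, ?_⟩
      have := h x hx
      cases hg : g x <;> simp [hg, hf] at this ⊢
    · rintro ⟨hx, hg⟩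
      refine ⟨hx, ?_⟩
      have := h x hx
      simp [hg] at this
      exact this
  · intro h i hi
    cases hg : g i
    · cases hf : f i
      · simp
      · exfalso
        have := (h i).mp ⟨hi, hf⟩
        rw [hg] at this
        simp_all
    · have := (h i).mpr ⟨hi, hg⟩
      simp [this.2]

theorem beq_swap (a b : List Char) : (a == b) = (b == a) := by
  rw [Bool.eq_iff_iff]
  constructor <;> intro h <;> simp_all

-- ===== VERDICT (by name: the statement is the Claim_ definition above) =====
theorem LettreInPsotions_spec : Claim_equal_LettreInPsotions := by
  intro mot lettre lpos _
  unfold Spec_LettreInPsotions LettreInPsotions LettreInPsotions_alt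
  rw [foldl_and_ite, Bool.true_and]
  rw [← all_iff_filter_sets mot.toList.length
      (fun i => [mot.toList.getD i ' '] == lettre.toList)
      (fun i => lpos.contains (PySem.Int.toStr (Int.ofNat i)))]
  congr 1
  funext i
  split_ifs with hg
  · exact beq_swap lettre.toList [mot.toList.getD i ' ']
  · rfl
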